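-- pv_equiv track=rewrite | github.com/c0rrey/jobseeker | pipeline/src/fetchers/ats.py | _derive_slug
-- ===== SOURCE A (Python) =====
-- def _derive_slug(company_name: str, domain: str | None) -> str:
--     """
--     Derive an ATS company slug from domain or company name.
--
--     Most ATS platforms use a lowercase slug that matches the company's primary
--     domain without the TLD, or the company name lowercased with spaces replaced.
--
--     Args:
--         company_name: Human-readable company name from the companies table.
--         domain: Optional domain field (e.g. "stripe.com").
--
--     Returns:
--         Best-guess slug string.
--     """
--     if domain:
--         # "stripe.com" -> "stripe", "my-company.io" -> "my-company"
--         base = domain.split(".")[0]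
--         return base.lower()
--     # Fallback: lowercase company name, replace spaces/special chars with hyphens
--     slug = company_name.lower().strip()
--     slug = "".join(c if c.isalnum() or c == "-" else "-" for c in slug)
--     # Collapse consecutive hyphens
--     while "--" in slug:
--         slug = slug.replace("--", "-")
--     return slug.strip("-")
-- ===== SOURCE B (Python) =====
-- def _derive_slug(company_name: str, domain: str | None) -> str:
--     if domain:
--         return domain.split(".")[0].lower()
--     # Single streaming pass: map each char and collapse hyphen runs on the fly.
--     out = []
--     last_hyphen = True  # suppresses leading hyphens too
--     for c in company_name.lower().strip():
--         if c.isalnum() or c == "-":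
--             ch = c
--         else:
--             ch = "-"
--         if ch == "-":
--             if not last_hyphen:
--                 out.append("-")
--                 last_hyphen = True
--         else:
--             out.append(ch)
--             last_hyphen = False
--     # drop at most one trailing hyphen (runs were collapsed already)
--     if out and out[-1] == "-":
--         out.pop()
--     return "".join(out)
-- ===== Notes on version B (the rewrite author's own statement) =====
-- stated objective: simpler
-- what changed: The fallback's three passes (map to hyphens, a repeated replace('--','-') loop until fixpoint, strip('-')) are fused into one streaming pass that keeps a last-was-hyphen flag, suppresses leading/repeated hyphens as it goes and drops at most one trailing hyphen.
import Mathlib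
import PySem

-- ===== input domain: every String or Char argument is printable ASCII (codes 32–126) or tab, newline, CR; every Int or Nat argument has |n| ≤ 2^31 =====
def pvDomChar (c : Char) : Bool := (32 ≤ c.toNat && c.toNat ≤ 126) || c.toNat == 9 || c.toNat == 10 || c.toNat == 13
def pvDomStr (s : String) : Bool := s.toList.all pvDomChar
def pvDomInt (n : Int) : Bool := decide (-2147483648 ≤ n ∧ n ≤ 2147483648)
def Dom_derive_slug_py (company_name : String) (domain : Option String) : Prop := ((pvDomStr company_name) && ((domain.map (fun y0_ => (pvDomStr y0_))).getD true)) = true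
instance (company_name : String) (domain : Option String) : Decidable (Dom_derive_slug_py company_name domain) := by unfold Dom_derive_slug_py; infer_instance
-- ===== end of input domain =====

-- B fuses A's three fallback passes (map to hyphens, repeated replace("--","-"), strip("-"))
-- into one streaming pass with a last-was-hyphen flag; same return value, domain branch unchanged.

-- ===== PORT A =====
-- pvRep mirrors ONE full pass of Python's slug.replace("--", "-") (non-overlapping, left to
-- right); the lemmas up to pvShrink are cited by pvRepLoop's termination proof.
def pvRep : List Char → List Char
  | [] => []
  | a :: t => if a = '-' ∧ t.head? = some '-' then '-' :: pvRep t.tail else a :: pvRep t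
termination_by l => l.length
decreasing_by all_goals (simp [List.length_tail]; try omega)

lemma pvRep_nil : pvRep [] = [] := by simp only [pvRep]

lemma pvRep_cons (a : Char) (t : List Char) :
    pvRep (a :: t) = if a = '-' ∧ t.head? = some '-' then '-' :: pvRep t.tail else a :: pvRep t := by
  simp only [pvRep]

lemma pvRep_length_le (l : List Char) : (pvRep l).length ≤ l.length := by
  induction l using pvRep.induct with
  | case1 => simp [pvRep_nil]
  | case2 a t h ih =>
      rw [pvRep_cons, if_pos h]
      simp only [List.length_cons, List.length_tail] at *
      omega
  | case3 a t h ih =>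
      rw [pvRep_cons, if_neg h]
      simp only [List.length_cons]
      omega

lemma pvRep_length_lt (l : List Char) (h : ['-', '-'] <:+: l) : (pvRep l).length < l.length := by
  induction l using pvRep.induct with
  | case1 => simp at h
  | case2 a t hc ih =>
      obtain ⟨ha, hh⟩ := hc
      subst ha
      rcases t with _ | ⟨b, t₂⟩
      · simp at hh
      · simp only [List.head?_cons, Option.some.injEq] at hh
        subst hh
        rw [pvRep_cons, if_pos ⟨rfl, rfl⟩, List.tail_cons]
        have := pvRep_length_le t₂
        simp only [List.length_cons]
        omega
  | case3 a t hc ih =>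
      have ht : ['-', '-'] <:+: t := by
        rcases List.infix_cons_iff.mp h with hp | hi
        · exfalso
          rcases t with _ | ⟨b, t₂⟩
          · have := hp.length_le; simp at this
          · obtain ⟨ha, hp2⟩ := List.cons_prefix_cons.mp hp
            obtain ⟨hb, _⟩ := List.cons_prefix_cons.mp hp2
            exact hc ⟨ha.symm, by simp [← hb]⟩
        · exact hi
      rw [pvRep_cons, if_neg hc]
      simp only [List.length_cons]
      exact Nat.succ_lt_succ (ih ht)

lemma pvReplace_go_eq (fuel : Nat) : ∀ (l acc : List Char), l.length ≤ fuel →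
    PySem.Chars.replace.go ['-', '-'] ['-'] fuel l acc = acc.reverse ++ pvRep l := by
  induction fuel with
  | zero =>
      intro l acc h
      have : l = [] := List.eq_nil_of_length_eq_zero (Nat.le_zero.mp h)
      subst this
      simp [PySem.Chars.replace.go, pvRep_nil]
  | succ n ih =>
      intro l acc h
      rcases l with _ | ⟨c, t⟩
      · simp [PySem.Chars.replace.go, pvRep_nil]
      · rw [PySem.Chars.replace.go]
        by_cases hp : List.isPrefixOf ['-', '-'] (c :: t) = true
        · rw [if_pos hp]
          obtain ⟨r, hr⟩ := List.isPrefixOf_iff_prefix.mp hp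
          have hc : c = '-' := by simpa using congrArg (List.head? ·) hr.symm
          subst hc
          have ht : t = '-' :: r := by simpa using congrArg (List.tail ·) hr.symm
          subst ht
          have hlen : r.length ≤ n := by simp at h; omega
          rw [show List.drop (['-', '-'] : List Char).length ('-' :: '-' :: r) = r from rfl]
          rw [ih r (['-'].reverse ++ acc) hlen]
          rw [pvRep_cons, if_pos ⟨rfl, rfl⟩, List.tail_cons]
          simp
        · rw [if_neg hp]
          have hlen : t.length ≤ n := by simp at h; omega
          rw [ih t (c :: acc) hlen]
          have hcond : ¬ (c = '-' ∧ t.head? = some '-') := by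
            rintro ⟨rfl, hh⟩
            rcases t with _ | ⟨b, t₂⟩
            · simp at hh
            · simp only [List.head?_cons, Option.some.injEq] at hh
              subst hh
              simp [List.isPrefixOf] at hp
          rw [pvRep_cons, if_neg hcond]
          simp

lemma pvReplace_eq (l : List Char) :
    PySem.Chars.replace l ['-', '-'] ['-'] = pvRep l := by
  unfold PySem.Chars.replace
  rw [if_neg (by simp)]
  simpa using pvReplace_go_eq l.length l [] le_rfl

lemma pvShrink (l : List Char) (h : PySem.Chars.isIn ['-', '-'] l = true) :
    (PySem.Chars.replace l ['-', '-'] ['-']).length < l.length := by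
  rw [pvReplace_eq]
  exact pvRep_length_lt l ((PySem.Chars.isIn_iff_infix _ _).mp h)

-- the `while "--" in slug: slug = slug.replace("--", "-")` loop
def pvRepLoop (l : List Char) : List Char :=
  if h : PySem.Chars.isIn ['-', '-'] l = true then
    pvRepLoop (PySem.Chars.replace l ['-', '-'] ['-'])
  else l
termination_by l.length
decreasing_by exact pvShrink l h

-- the generator expression's per-character mapping
def pvMapA (c : Char) : Char := if PySem.Chars.isalnum c || c == '-' then c else '-'

def pvFallbackA (company_name : String) : String :=
  let slug := PySem.Chars.strip (PySem.Chars.lower company_name.toList)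
  let slug2 := slug.map pvMapA
  String.mk (PySem.Chars.stripChars (pvRepLoop slug2) ['-'])

def derive_slug_py (company_name : String) (domain : Option String) : String :=
  match domain with
  | some d =>
      if d.toList ≠ [] then
        String.mk (PySem.Chars.lower ((PySem.Chars.splitOn d.toList ['.']).headD []))
      else pvFallbackA company_name
  | none => pvFallbackA company_name

-- ===== PORT B =====
-- one pass over the characters: out accumulator + last-was-hyphen flag (Source B's loop)
def pvAltLoop : List Char → List Char → Bool → List Char
  | [], out, _ => out
  | c :: rest, out, lastHyp =>
    let ch := if PySem.Chars.isalnum c || c == '-' then c else '-'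
    if ch = '-' then
      if lastHyp then pvAltLoop rest out lastHyp
      else pvAltLoop rest (out ++ ['-']) true
    else pvAltLoop rest (out ++ [ch]) false

def pvFallbackB (company_name : String) : String :=
  let out := pvAltLoop (PySem.Chars.strip (PySem.Chars.lower company_name.toList)) [] true
  -- `if out and out[-1] == "-": out.pop()`
  let out2 := if out.getLast? = some '-' then out.dropLast else out
  String.mk out2

def derive_slug_py_alt (company_name : String) (domain : Option String) : String :=
  match domain with
  | some d =>
      if d.toList ≠ [] then
        String.mk (PySem.Chars.lower ((PySem.Chars.splitOn d.toList ['.']).headD []))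
      else pvFallbackB company_name
  | none => pvFallbackB company_name

-- ===== PRECONDITION & SPEC =====
def Spec_derive_slug_py (company_name : String) (domain : Option String) (out : String) : Prop := out = derive_slug_py_alt company_name domain
instance (company_name : String) (domain : Option String) (out : String) : Decidable (Spec_derive_slug_py company_name domain out) := by unfold Spec_derive_slug_py; infer_instance

-- ===== CLAIM (what is proved, stated in full; the proofs are below) =====
def Claim_equal_derive_slug_py : Prop := ∀ (company_name : String) (domain : Option String), Dom_derive_slug_py company_name domain → Spec_derive_slug_py company_name domain (derive_slug_py company_name domain)

-- ===== LEMMAS AND PROOFS =====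

-- canonical "collapse hyphen runs" with a last-was-hyphen flag; both ports reduce to it
def pvCF : Bool → List Char → List Char
  | _, [] => []
  | flag, c :: t =>
    if c = '-' then (if flag then pvCF true t else '-' :: pvCF true t)
    else c :: pvCF false t

lemma pvCF_cons (flag : Bool) (c : Char) (t : List Char) :
    pvCF flag (c :: t) =
      if c = '-' then (if flag then pvCF true t else '-' :: pvCF true t)
      else c :: pvCF false t := rfl

-- "no two adjacent hyphens"
def pvNoDD : List Char → Bool
  | [] => true
  | a :: t => !(a == '-' && t.head? == some '-') && pvNoDD t

lemma pvNoDD_cons (a : Char) (t : List Char) :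
    pvNoDD (a :: t) = true ↔ (¬ (a = '-' ∧ t.head? = some '-') ∧ pvNoDD t = true) := by
  simp [pvNoDD]; tauto

lemma pvP_true : ((['-'] : List Char).contains '-') = true := by simp

lemma pvP_false (c : Char) (h : c ≠ '-') : ((['-'] : List Char).contains c) = false := by simp [h]

lemma pvAlt_step (c : Char) (rest out : List Char) (flag : Bool) :
    pvAltLoop (c :: rest) out flag =
      if (pvMapA c) = '-' then
        (if flag then pvAltLoop rest out flag else pvAltLoop rest (out ++ ['-']) true)
      else pvAltLoop rest (out ++ [pvMapA c]) false := rfl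

lemma pvAltLoop_eq (cs : List Char) : ∀ (out : List Char) (flag : Bool),
    pvAltLoop cs out flag = out ++ pvCF flag (cs.map pvMapA) := by
  induction cs with
  | nil => intro out flag; simp [pvAltLoop, pvCF]
  | cons c rest ih =>
      intro out flag
      rw [pvAlt_step, List.map_cons, pvCF_cons]
      by_cases hm : pvMapA c = '-'
      · rw [if_pos hm, if_pos hm]
        cases flag with
        | true => rw [if_pos rfl, if_pos rfl, ih]
        | false =>
            rw [if_neg (by simp), if_neg (by simp), ih]
            simp
      · rw [if_neg hm, if_neg hm, ih]
        simp

lemma pvCF_true_head (l : List Char) : (pvCF true l).head? ≠ some '-' := by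
  induction l with
  | nil => simp [pvCF]
  | cons c t ih =>
      rw [pvCF_cons]
      by_cases hc : c = '-'
      · rw [if_pos hc, if_pos rfl]; exact ih
      · rw [if_neg hc]; simp [hc]

lemma pvDropWhile_not_head (u : List Char) (h : u.head? ≠ some '-') :
    u.dropWhile (fun c => (['-'] : List Char).contains c) = u := by
  rcases u with _ | ⟨c, t⟩
  · simp
  · have hc : c ≠ '-' := by simpa using h
    rw [List.dropWhile_cons, pvP_false c hc]
    simp

lemma pvDropWhile_cf_false (m : List Char) :
    (pvCF false m).dropWhile (fun c => (['-'] : List Char).contains c) = pvCF true m := by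
  rcases m with _ | ⟨c, t⟩
  · simp [pvCF]
  · by_cases hc : c = '-'
    · subst hc
      rw [pvCF_cons, if_pos rfl, if_neg (by simp)]
      rw [List.dropWhile_cons, pvP_true, if_pos rfl]
      rw [pvDropWhile_not_head _ (pvCF_true_head t)]
      rw [pvCF_cons, if_pos rfl, if_pos rfl]
    · rw [pvCF_cons, if_neg hc, List.dropWhile_cons, pvP_false c hc]
      rw [pvCF_cons, if_neg hc]
      simp

lemma pvNoDD_iff (l : List Char) : pvNoDD l = true ↔ ¬ (['-', '-'] <:+: l) := by
  induction l with
  | nil =>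
      constructor
      · intro _ h
        have := h.length_le; simp at this
      · intro _; rfl
  | cons a t ih =>
      rw [pvNoDD_cons, List.infix_cons_iff]
      constructor
      · rintro ⟨h1, h2⟩ h3
        rcases h3 with hp | hi
        · rcases t with _ | ⟨b, t₂⟩
          · have := hp.length_le; simp at this
          · obtain ⟨ha, hp2⟩ := List.cons_prefix_cons.mp hp
            obtain ⟨hb, _⟩ := List.cons_prefix_cons.mp hp2
            exact h1 ⟨ha.symm, by simp [← hb]⟩
        · exact (ih.mp h2) hi
      · intro h3
        refine ⟨?_, ih.mpr (fun hi => h3 (Or.inr hi))⟩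
        rintro ⟨rfl, hh⟩
        rcases t with _ | ⟨b, t₂⟩
        · simp at hh
        · simp only [List.head?_cons, Option.some.injEq] at hh
          subst hh
          exact h3 (Or.inl ⟨t₂, rfl⟩)

lemma pvNoDD_cf (l : List Char) : ∀ (flag : Bool), pvNoDD (pvCF flag l) = true := by
  induction l with
  | nil => intro flag; rfl
  | cons c t ih =>
      intro flag
      rw [pvCF_cons]
      by_cases hc : c = '-'
      · rw [if_pos hc]
        cases flag with
        | true => rw [if_pos rfl]; exact ih true
        | false =>
            rw [if_neg (by simp), pvNoDD_cons]
            exact ⟨fun h => pvCF_true_head t h.2, ih true⟩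
      · rw [if_neg hc, pvNoDD_cons]
        exact ⟨fun h => hc h.1, ih false⟩

lemma pvCF_id : ∀ (l : List Char), pvNoDD l = true →
    pvCF false l = l ∧ (l.head? ≠ some '-' → pvCF true l = l) := by
  intro l
  induction l with
  | nil => intro _; exact ⟨rfl, fun _ => rfl⟩
  | cons c t ih =>
      intro h
      obtain ⟨hadj, ht⟩ := (pvNoDD_cons c t).mp h
      obtain ⟨ih1, ih2⟩ := ih ht
      by_cases hc : c = '-'
      · subst hc
        have hth : t.head? ≠ some '-' := fun hh => hadj ⟨rfl, hh⟩
        refine ⟨?_, fun hh => absurd rfl hh⟩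
        rw [pvCF_cons, if_pos rfl, if_neg (by simp), ih2 hth]
      · refine ⟨?_, fun _ => ?_⟩
        · rw [pvCF_cons, if_neg hc, ih1]
        · rw [pvCF_cons, if_neg hc, ih1]

lemma pvNoDD_reverse (l : List Char) (h : pvNoDD l = true) : pvNoDD l.reverse = true := by
  rw [pvNoDD_iff] at h ⊢
  intro hinf
  apply h
  have h2 := List.reverse_infix.mpr hinf
  simpa using h2

lemma pvCF_rep (l : List Char) : ∀ (flag : Bool), pvCF flag (pvRep l) = pvCF flag l := by
  induction l using pvRep.induct with
  | case1 => intro flag; rw [pvRep_nil]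
  | case2 a t hc ih =>
      intro flag
      obtain ⟨ha, hh⟩ := hc
      subst ha
      rcases t with _ | ⟨b, t₂⟩
      · simp at hh
      · simp only [List.head?_cons, Option.some.injEq] at hh
        subst hh
        simp only [List.tail_cons] at ih
        rw [pvRep_cons, if_pos ⟨rfl, rfl⟩, List.tail_cons]
        cases flag <;> simp [pvCF_cons, ih]
  | case3 a t hc ih =>
      intro flag
      rw [pvRep_cons, if_neg hc]
      by_cases ha : a = '-'
      · subst ha
        cases flag <;> simp [pvCF_cons, ih]
      · simp [pvCF_cons, ha, ih]

lemma pvRepLoop_eq_aux : ∀ (n : Nat) (l : List Char), l.length ≤ n →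
    pvRepLoop l = pvCF false l := by
  intro n
  induction n with
  | zero =>
      intro l hl
      have : l = [] := List.eq_nil_of_length_eq_zero (Nat.le_zero.mp hl)
      subst this
      unfold pvRepLoop
      rw [dif_neg (by decide)]
      rfl
  | succ n ih =>
      intro l hl
      unfold pvRepLoop
      split
      · rename_i h
        have hlen : (PySem.Chars.replace l ['-', '-'] ['-']).length ≤ n := by
          have := pvShrink l h
          omega
        rw [ih _ hlen, pvReplace_eq, pvCF_rep]
      · rename_i h
        have hn : pvNoDD l = true :=
          (pvNoDD_iff l).mpr (fun hinf => h ((PySem.Chars.isIn_iff_infix _ _).mpr hinf))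
        exact ((pvCF_id l hn).1).symm

lemma pvRepLoop_eq (l : List Char) : pvRepLoop l = pvCF false l :=
  pvRepLoop_eq_aux l.length l le_rfl

lemma pvStrip_cf (m : List Char) :
    PySem.Chars.stripChars (pvCF false m) ['-'] =
      (if (pvCF true m).getLast? = some '-' then (pvCF true m).dropLast else pvCF true m) := by
  simp only [PySem.Chars.stripChars]
  rw [pvDropWhile_cf_false]
  have hv : pvNoDD (pvCF true m) = true := pvNoDD_cf m true
  rcases hrev : (pvCF true m).reverse with _ | ⟨c, t⟩
  · have h0 : pvCF true m = [] := by
      have := congrArg List.reverse hrev; simpa using this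
    simp [h0]
  · have hvr : pvCF true m = t.reverse ++ [c] := by
      have := congrArg List.reverse hrev; simpa using this
    have hlast : (pvCF true m).getLast? = some c := by rw [hvr]; simp
    by_cases hc : c = '-'
    · subst hc
      have hnr : pvNoDD ('-' :: t) = true := by
        rw [← hrev]; exact pvNoDD_reverse _ hv
      have hth : t.head? ≠ some '-' := fun hh => (((pvNoDD_cons _ _).mp hnr).1) ⟨rfl, hh⟩
      rw [List.dropWhile_cons, pvP_true, if_pos rfl, pvDropWhile_not_head t hth,
          if_pos hlast, hvr]
      simp
    · rw [pvDropWhile_not_head (c :: t) (by simpa using hc), ← hrev,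
          if_neg (by rw [hlast]; simpa using hc)]
      simp

lemma pvFallback_eq (cn : String) : pvFallbackA cn = pvFallbackB cn := by
  simp only [pvFallbackA, pvFallbackB, pvAltLoop_eq, List.nil_append, pvRepLoop_eq, pvStrip_cf]

-- ===== VERDICT (by name: the statement is the Claim_ definition above) =====
theorem derive_slug_py_spec : Claim_equal_derive_slug_py := by
  intro cn dom _
  unfold Spec_derive_slug_py
  cases dom with
  | none => simpa [derive_slug_py, derive_slug_py_alt] using pvFallback_eq cn
  | some d =>
      by_cases h : d.toList = []
      · simpa [derive_slug_py, derive_slug_py_alt, h] using pvFallback_eq cn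
      · simp [derive_slug_py, derive_slug_py_alt, h]
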